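-- pv_equiv track=rewrite | github.com/arth4/magnets2midi | magnets2midi.py | scale2tones
-- ===== SOURCE A (Python) =====
-- def num2note(num):
--     return _NOTES[num]
--
-- def note2num(note):
--     num = _NOTE2NUM[note[0].upper()]
--     # check sharp/flat
--     num += 1 if note[-1] == "#" else (-1 if note[-1] == "b" else 0)
--     return num
--
-- def normalise_note(note):
--     """ensures notes are in consistant form"""
--     return num2note(note2num(note))
--
-- def scale2tones(scale, start_octave=1):
--     """makes scale starting at start_octave"""
--     scale = list(map(normalise_note, scale))
--     octave = start_octave
--     tones = []
--     last_note_num = -1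
--
--     for note in scale:
--         note_num = note2num(note)
--         if note_num <= last_note_num:
--             octave += 1
--         tones.append(note + str(octave))
--         last_note_num = note_num
--     return tones
--
-- _NOTES = ["A", "A#", "B", "C", "C#", "D", "D#", "E", "F", "F#", "G", "G#"]
--
-- _NOTE2NUM = {"A": 0, "B": 2, "C": 3, "D": 5, "E": 7, "F": 8, "G": 10}
-- ===== SOURCE B (Python) =====
-- _NOTES = ["A", "A#", "B", "C", "C#", "D", "D#", "E", "F", "F#", "G", "G#"]
-- _NOTE2NUM = {"A": 0, "B": 2, "C": 3, "D": 5, "E": 7, "F": 8, "G": 10}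
--
-- def note2num(note):
--     num = _NOTE2NUM[note[0].upper()]
--     num += 1 if note[-1] == "#" else (-1 if note[-1] == "b" else 0)
--     return num
--
-- def scale2tones(scale, start_octave=1):
--     """makes scale starting at start_octave"""
--     tones = []
--     a = None  # absolute pitch: 12 * octave + pitch class
--     for note in scale:
--         p = note2num(note) % 12  # pitch class 0..11
--         if a is None:
--             a = 12 * start_octave + p
--         else:
--             # smallest absolute pitch strictly above the previous one
--             # that has pitch class p
--             a += (p - a - 1) % 12 + 1
--         tones.append(_NOTES[p] + str(a // 12))
--     return tones
-- ===== Notes on version B (the rewrite author's own statement) =====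
-- stated objective: alternative
-- what changed: Replaces A's compare-and-bump running-octave loop (normalise each note, renumber it, increment octave when the number does not rise) by a monotone absolute-pitch formulation: each note's pitch class p = note2num(note) % 12 advances an absolute pitch a by ((p - a - 1) % 12) + 1, the smallest strictly-larger value with that pitch class, and the printed octave is a // 12; the note name is read directly from _NOTES[p], so normalise_note and the octave comparison disappear.
-- outside the precondition, e.g. on scale2tones(['H'], 1): A raises KeyError, B raises KeyError; on scale2tones([''], 1): A raises IndexError, B raises IndexError
import Mathlib
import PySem

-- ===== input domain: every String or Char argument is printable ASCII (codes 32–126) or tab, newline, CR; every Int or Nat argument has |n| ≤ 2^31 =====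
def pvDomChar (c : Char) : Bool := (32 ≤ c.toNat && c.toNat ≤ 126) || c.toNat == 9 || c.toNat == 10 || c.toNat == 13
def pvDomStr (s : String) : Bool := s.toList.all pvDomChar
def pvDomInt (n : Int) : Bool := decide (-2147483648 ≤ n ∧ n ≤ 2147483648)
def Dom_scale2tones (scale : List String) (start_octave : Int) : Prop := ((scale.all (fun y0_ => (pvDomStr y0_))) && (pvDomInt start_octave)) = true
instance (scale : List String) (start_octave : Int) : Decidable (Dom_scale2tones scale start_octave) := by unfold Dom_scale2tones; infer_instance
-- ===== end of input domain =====

-- B replaces A's compare-and-bump running-octave loop by a monotone absolute-pitch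
-- formulation (a += ((p - a - 1) % 12) + 1, octave = a // 12); objective: alternative
-- algorithm, same cost.


-- ===== PORT A =====
def pyNOTES : List String := ["A", "A#", "B", "C", "C#", "D", "D#", "E", "F", "F#", "G", "G#"]

def pyNOTE2NUM : PySem.Dict Char Int :=
  PySem.Dict.ofList [('A', 0), ('B', 2), ('C', 3), ('D', 5), ('E', 7), ('F', 8), ('G', 10)]

-- note2num; none exactly where Python raises (IndexError on "" / KeyError on a bad first letter)
def note2numPy (note : String) : Option Int :=
  match PySem.Str.pyGet? note 0 with
  | none => none
  | some c0 =>
    match pyNOTE2NUM.get? (PySem.Chars.upperChar c0) with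
    | none => none
    | some n =>
      some (n + (if PySem.Str.pyGet? note (-1) = some '#' then 1
                 else if PySem.Str.pyGet? note (-1) = some 'b' then -1 else 0))

-- normalise_note; the .getD "" totalizes the raising case, which Pre_scale2tones excludes
def normalisePy (note : String) : String :=
  ((note2numPy note).bind (fun n => PySem.List.pyGet? pyNOTES n)).getD ""

-- A's 'for note in scale' loop with its (octave, last_note_num) state
def s2tLoop : List String → Int → Int → List String
  | [], _, _ => []
  | note :: rest, octave, last =>
    let note_num := (note2numPy note).getD 0
    let octave' := if note_num ≤ last then octave + 1 else octave
    (note ++ PySem.Int.toStr octave') :: s2tLoop rest octave' note_num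

def scale2tones (scale : List String) (start_octave : Int) : List String :=
  s2tLoop (scale.map normalisePy) start_octave (-1)

-- ===== PORT B =====
-- B's loop: absolute pitch a (Option Int, None before the first note), stepped by
-- modular arithmetic; note name from _NOTES[p], octave printed as a // 12
def s2tLoopB (start_octave : Int) : List String → Option Int → List String
  | [], _ => []
  | note :: rest, aOpt =>
    let p := PySem.Int.mod ((note2numPy note).getD 0) 12
    let a := match aOpt with
      | none => 12 * start_octave + p
      | some a0 => a0 + PySem.Int.mod (p - a0 - 1) 12 + 1
    ((PySem.List.pyGet? pyNOTES p).getD "" ++ PySem.Int.toStr (PySem.Int.floordiv a 12))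
      :: s2tLoopB start_octave rest (some a)

def scale2tones_alt (scale : List String) (start_octave : Int) : List String :=
  s2tLoopB start_octave scale none

-- ===== PRECONDITION & SPEC =====
-- Pre_ excludes exactly the inputs where Python A raises: a note that is the empty string
-- (IndexError) or whose first character, uppercased, is not one of A..G (KeyError).
def Pre_scale2tones (scale : List String) (start_octave : Int) : Prop :=
  ∀ s ∈ scale, (s.toList.head?.map PySem.Chars.upperChar) ∈ (['A', 'B', 'C', 'D', 'E', 'F', 'G'].map some)
instance (scale : List String) (start_octave : Int) : Decidable (Pre_scale2tones scale start_octave) := by unfold Pre_scale2tones; infer_instance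

def pvWitness_scale2tones : List String × Int := (["C", "d", "Eb", "f#", "a"], 1)

def Spec_scale2tones (scale : List String) (start_octave : Int) (out : List String) : Prop := out = scale2tones_alt scale start_octave
instance (scale : List String) (start_octave : Int) (out : List String) : Decidable (Spec_scale2tones scale start_octave out) := by unfold Spec_scale2tones; infer_instance

-- ===== CLAIM (what is proved, stated in full; the proofs are below) =====
def Claim_equal_scale2tones : Prop := ∀ (scale : List String) (start_octave : Int), Dom_scale2tones scale start_octave → Pre_scale2tones scale start_octave → Spec_scale2tones scale start_octave (scale2tones scale start_octave)

-- ===== LEMMAS AND PROOFS =====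

-- a valid note: nonempty, first letter (uppercased) in A..G
def ValidNote (s : String) : Prop :=
  (s.toList.head?.map PySem.Chars.upperChar) ∈ (['A', 'B', 'C', 'D', 'E', 'F', 'G'].map some)

theorem note2num_bounds (s : String) (h : ValidNote s) :
    ∃ m : Int, note2numPy s = some m ∧ -1 ≤ m ∧ m ≤ 11 := by
  cases hs : s.toList with
  | nil => unfold ValidNote at h; rw [hs] at h; simp at h
  | cons c rest =>
    unfold ValidNote at h; rw [hs] at h
    simp at h
    have h0 : PySem.Str.pyGet? s 0 = some c := by
      simp [PySem.Str.pyGet?, hs]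
    unfold note2numPy
    rw [h0]
    have hb : ∃ b : Int, pyNOTE2NUM.get? (PySem.Chars.upperChar c) = some b ∧
        (b = 0 ∨ b = 2 ∨ b = 3 ∨ b = 5 ∨ b = 7 ∨ b = 8 ∨ b = 10) := by
      rcases h with h | h | h | h | h | h | h <;> rw [h] <;> refine ⟨_, rfl, by decide⟩
    obtain ⟨b, hbeq, hbv⟩ := hb
    simp only [hbeq]
    refine ⟨_, rfl, ?_, ?_⟩ <;> split_ifs <;> omega

-- for a valid note with raw number m: the normalised name is _NOTES[m % 12], its own
-- note number is m % 12, and m % 12 lies in [0, 12)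
theorem normalise_key (s : String) (h : ValidNote s) :
    ∃ p : Int, PySem.Int.mod ((note2numPy s).getD 0) 12 = p ∧
      normalisePy s = (PySem.List.pyGet? pyNOTES p).getD "" ∧
      (note2numPy (normalisePy s)).getD 0 = p ∧ 0 ≤ p ∧ p < 12 := by
  obtain ⟨m, hm, h1, h2⟩ := note2num_bounds s h
  refine ⟨PySem.Int.mod m 12, by simp [hm], ?_⟩
  unfold normalisePy
  rw [hm, Option.bind_some]
  interval_cases m <;> exact ⟨by decide, by decide, by decide, by decide⟩

-- the two loops agree whenever the absolute pitch a equals 12*octave + last pitch class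
theorem loops_eq (so : Int) : ∀ (notes : List String), (∀ s ∈ notes, ValidNote s) →
    ∀ (o p a : Int), 0 ≤ p → p < 12 → a = 12 * o + p →
    s2tLoop (notes.map normalisePy) o p = s2tLoopB so notes (some a) := by
  intro notes
  induction notes with
  | nil => intro _ o p a _ _ _; rfl
  | cons s rest ih =>
    intro hv o p a hp0 hp12 ha
    obtain ⟨q, hq, hname, hnum, hq0, hq12⟩ := normalise_key s (hv s (by simp))
    simp only [List.map_cons, s2tLoop, s2tLoopB, hq, hnum]
    have hmod : PySem.Int.mod (q - a - 1) 12 = (q - a - 1) % 12 :=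
      PySem.Int.mod_eq_emod_of_pos (by omega)
    by_cases hle : q ≤ p
    · rw [if_pos hle]
      have ha' : a + PySem.Int.mod (q - a - 1) 12 + 1 = 12 * (o + 1) + q := by
        rw [hmod]; omega
      rw [ha']
      have hdiv : PySem.Int.floordiv (12 * (o + 1) + q) 12 = o + 1 := by
        rw [PySem.Int.floordiv_eq_ediv_of_pos (by omega)]; omega
      rw [hdiv, hname]
      exact congrArg _ (ih (fun t ht => hv t (by simp [ht])) (o + 1) q _ hq0 hq12 rfl)
    · rw [if_neg hle]
      have ha' : a + PySem.Int.mod (q - a - 1) 12 + 1 = 12 * o + q := by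
        rw [hmod]; omega
      rw [ha']
      have hdiv : PySem.Int.floordiv (12 * o + q) 12 = o := by
        rw [PySem.Int.floordiv_eq_ediv_of_pos (by omega)]; omega
      rw [hdiv, hname]
      exact congrArg _ (ih (fun t ht => hv t (by simp [ht])) o q _ hq0 hq12 rfl)

-- ===== VERDICT (by name: the statement is the Claim_ definition above) =====
theorem scale2tones_spec : Claim_equal_scale2tones := by
  intro scale so _ hpre
  unfold Spec_scale2tones scale2tones scale2tones_alt
  cases scale with
  | nil => rfl
  | cons s rest =>
    obtain ⟨q, hq, hname, hnum, hq0, hq12⟩ := normalise_key s (hpre s (by simp))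
    simp only [List.map_cons, s2tLoop, s2tLoopB, hq, hnum]
    rw [if_neg (by omega)]
    have hdiv : PySem.Int.floordiv (12 * so + q) 12 = so := by
      rw [PySem.Int.floordiv_eq_ediv_of_pos (by omega)]; omega
    rw [hdiv, hname]
    exact congrArg _ (loops_eq so rest (fun t ht => hpre t (by simp [ht])) so q _ hq0 hq12 rfl)
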